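-- pv_equiv track=rewrite | github.com/liupengsay/PyIsTheBestLang | src/basis/two_pointer/question.py | lc_1712
-- ===== SOURCE A (Python) =====
-- from itertools import accumulate
-- from typing import List
--
-- def lc_1712(nums: List[int]) -> int:
--     # 模板：经典三指针，即快慢双指针维护满足条件的分割点个数
--     mod = 10**9 + 7
--     ans = 0
--     pre = list(accumulate(nums, initial=0))
--     j1 = j2 = 0
--     n = len(nums)
--     for i in range(n):
--         # mid的区间范围为 [i+1, j1~(j2-1)]
--         while j1 <= i or (j1 < n and pre[j1 + 1] - pre[i + 1] < pre[i + 1]):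
--             j1 += 1  # j1 必须大于 i 且 mid >= left 区间的和
--         while j2 < j1 or (j2 < n - 1 and pre[-1] - pre[j2 + 1] >= pre[j2 + 1] - pre[i + 1]):
--             j2 += 1  # j2 必须大于等于j1 且 mid < right 非空因此 j2 < n-1
--         if j2 >= j1:  # 此时[i+1, j1] 到 区间[i+1, j2-1] 是合法的
--             ans += j2 - j1
--     return ans % mod
-- ===== SOURCE B (Python) =====
-- from itertools import accumulate
-- from bisect import bisect_left, bisect_right
-- from typing import List
--
-- def lc_1712(nums: List[int]) -> int:
--     mod = 10**9 + 7
--     n = len(nums)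
--     pre = list(accumulate(nums, initial=0))
--     total = pre[n]
--     ans = 0
--     for i in range(n):
--         # smallest mid-end j >= i+1 with mid-sum >= left-sum (pre index j+1), n if none
--         lo = bisect_left(pre, 2 * pre[i + 1], i + 2, n + 1) - 1
--         # largest prefix index k with 2*pre[k] <= total + pre[i+1]
--         u = bisect_right(pre, (total + pre[i + 1]) // 2, 0, n + 1) - 1
--         ans += max(lo, min(n - 1, u)) - lo
--     return ans % mod
-- ===== Notes on version B (the rewrite author's own statement) =====
-- stated objective: alternative
-- what changed: Replaces A's stateful monotone two-pointer sweep with stateless per-index binary searches (bisect_left/bisect_right on the sorted prefix-sum array) that locate the feasible mid-boundary interval in closed form; correct because with nonnegative elements the prefix array is monotone.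
-- outside the precondition, e.g. on lc_1712([-2, -3, 3, -5]): A returns 0, B returns 1
import Mathlib
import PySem

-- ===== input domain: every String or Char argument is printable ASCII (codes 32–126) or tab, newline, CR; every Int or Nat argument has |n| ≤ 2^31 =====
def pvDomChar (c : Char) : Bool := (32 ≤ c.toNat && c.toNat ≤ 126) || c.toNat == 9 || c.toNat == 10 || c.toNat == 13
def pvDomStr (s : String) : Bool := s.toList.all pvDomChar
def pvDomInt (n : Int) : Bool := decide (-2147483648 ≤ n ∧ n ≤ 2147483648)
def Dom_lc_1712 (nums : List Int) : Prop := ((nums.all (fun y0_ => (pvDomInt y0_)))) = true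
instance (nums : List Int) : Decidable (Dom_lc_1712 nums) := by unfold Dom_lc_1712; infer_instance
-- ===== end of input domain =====

-- B replaces A's stateful two-pointer sweep by stateless per-index binary searches on the
-- monotone prefix-sum array (an 'alternative' decomposition); return values agree on the
-- problem's natural domain of nonnegative elements (Pre_).

-- ===== PORT A =====
-- pre = list(accumulate(nums, initial=0))  (shared by both ports; both Pythons build the same prefix array)
def pvPre (nums : List Int) : List Int := List.scanl (· + ·) 0 nums

-- while j1 <= i or (j1 < n and pre[j1+1] - pre[i+1] < pre[i+1]): j1 += 1
-- (structural recursion on the loop's decreasing measure as fuel; at fuel 0 the condition is false)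
def pvAdv1Aux (pre : List Int) (n i : Nat) : Nat → Nat → Nat
  | 0, j => j
  | fuel + 1, j =>
    if j ≤ i ∨ (j < n ∧ pre.getD (j + 1) 0 - pre.getD (i + 1) 0 < pre.getD (i + 1) 0) then
      pvAdv1Aux pre n i fuel (j + 1)
    else j

def pvAdv1 (pre : List Int) (n i j : Nat) : Nat := pvAdv1Aux pre n i (n + i + 1 - j) j

-- while j2 < j1 or (j2 < n - 1 and pre[-1] - pre[j2+1] >= pre[j2+1] - pre[i+1]): j2 += 1
def pvAdv2Aux (pre : List Int) (n i j1 : Nat) : Nat → Nat → Nat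
  | 0, j => j
  | fuel + 1, j =>
    if j < j1 ∨ (j + 1 < n ∧ pre.getD n 0 - pre.getD (j + 1) 0 ≥ pre.getD (j + 1) 0 - pre.getD (i + 1) 0) then
      pvAdv2Aux pre n i j1 fuel (j + 1)
    else j

def pvAdv2 (pre : List Int) (n i j1 j : Nat) : Nat := pvAdv2Aux pre n i j1 (max j1 n - j) j

def lc_1712 (nums : List Int) : Int :=
  let n := nums.length
  let pre := pvPre nums
  let s := (List.range n).foldl
    (fun (st : Nat × Nat × Int) i =>
      let j1 := pvAdv1 pre n i st.1
      let j2 := pvAdv2 pre n i j1 st.2.1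
      (j1, j2, if j1 ≤ j2 then st.2.2 + ((j2 : Int) - (j1 : Int)) else st.2.2))
    (0, 0, 0)
  PySem.Int.mod s.2.2 (10 ^ 9 + 7)

-- ===== PORT B =====
-- bisect.bisect_left(a, x, lo, hi): exact port of CPython's loop
-- 'while lo < hi: mid = (lo+hi)//2; if a[mid] < x: lo = mid+1 else hi = mid'
-- (fuel = hi - lo bounds the halving; at fuel 0 the loop condition is false)
def pvBisectLeftAux (a : List Int) (x : Int) : Nat → Nat → Nat → Nat
  | 0, lo, _ => lo
  | fuel + 1, lo, hi =>
    if lo < hi then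
      let mid := (lo + hi) / 2
      if a.getD mid 0 < x then pvBisectLeftAux a x fuel (mid + 1) hi
      else pvBisectLeftAux a x fuel lo mid
    else lo

def pvBisectLeft (a : List Int) (x : Int) (lo hi : Nat) : Nat := pvBisectLeftAux a x (hi - lo) lo hi

-- bisect.bisect_right(a, x, lo, hi): same loop with the test 'x < a[mid]'
def pvBisectRightAux (a : List Int) (x : Int) : Nat → Nat → Nat → Nat
  | 0, lo, _ => lo
  | fuel + 1, lo, hi =>
    if lo < hi then
      let mid := (lo + hi) / 2
      if x < a.getD mid 0 then pvBisectRightAux a x fuel lo mid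
      else pvBisectRightAux a x fuel (mid + 1) hi
    else lo

def pvBisectRight (a : List Int) (x : Int) (lo hi : Nat) : Nat := pvBisectRightAux a x (hi - lo) lo hi

def lc_1712_alt (nums : List Int) : Int :=
  let n := nums.length
  let pre := pvPre nums
  let total := pre.getD n 0
  let ans := (List.range n).foldl
    (fun (ans : Int) i =>
      let lo : Int := (pvBisectLeft pre (2 * pre.getD (i + 1) 0) (i + 2) (n + 1) : Int) - 1
      let u : Int := (pvBisectRight pre (PySem.Int.floordiv (total + pre.getD (i + 1) 0) 2) 0 (n + 1) : Int) - 1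
      ans + (max lo (min ((n : Int) - 1) u) - lo)) 0
  PySem.Int.mod ans (10 ^ 9 + 7)

-- ===== PRECONDITION & SPEC =====
-- Pre_ excludes lists of length ≥ 3 containing a negative element: outside the problem's
-- natural domain of nonnegative values (LeetCode 1712 guarantees 0 ≤ nums[i]) the prefix
-- array is not sorted, so A's two-pointer sweep and B's binary searches each return an
-- accidental value there; lists of length ≤ 2 are kept (both programs return 0 on them).
def Pre_lc_1712 (nums : List Int) : Prop := (∀ x ∈ nums, 0 ≤ x) ∨ nums.length ≤ 2
instance (nums : List Int) : Decidable (Pre_lc_1712 nums) := by unfold Pre_lc_1712; infer_instance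

def pvWitness_lc_1712 : List Int := [0, 1, 2, 2, 2, 5]

def Spec_lc_1712 (nums : List Int) (out : Int) : Prop := out = lc_1712_alt nums
instance (nums : List Int) (out : Int) : Decidable (Spec_lc_1712 nums out) := by unfold Spec_lc_1712; infer_instance

-- ===== CLAIM (what is proved, stated in full; the proofs are below) =====
def Claim_equal_lc_1712 : Prop := ∀ (nums : List Int), Dom_lc_1712 nums → Pre_lc_1712 nums → Spec_lc_1712 nums (lc_1712 nums)

-- ===== LEMMAS AND PROOFS =====

-- the least index ≥ i+1 at which A's first while loop stops (= B's bisect_left target)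
def pvF1ex (pre : List Int) (n i : Nat) :
    ∃ j, i + 1 ≤ j ∧ (n ≤ j ∨ 2 * pre.getD (i + 1) 0 ≤ pre.getD (j + 1) 0) :=
  ⟨max (i + 1) n, ⟨by omega, Or.inl (by omega)⟩⟩

def pvF1 (pre : List Int) (n i : Nat) : Nat := Nat.find (pvF1ex pre n i)

-- the least index ≥ F1 at which A's second while loop stops
def pvF2ex (pre : List Int) (n i : Nat) :
    ∃ j, pvF1 pre n i ≤ j ∧ (n ≤ j + 1 ∨ pre.getD n 0 + pre.getD (i + 1) 0 < 2 * pre.getD (j + 1) 0) :=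
  ⟨max (pvF1 pre n i) (n - 1), ⟨by omega, Or.inl (by omega)⟩⟩

def pvF2 (pre : List Int) (n i : Nat) : Nat := Nat.find (pvF2ex pre n i)

theorem pvF1_spec (pre : List Int) (n i : Nat) :
    i + 1 ≤ pvF1 pre n i ∧ (n ≤ pvF1 pre n i ∨ 2 * pre.getD (i + 1) 0 ≤ pre.getD (pvF1 pre n i + 1) 0) :=
  Nat.find_spec (pvF1ex pre n i)

theorem pvF1_min (pre : List Int) (n i : Nat) {s : Nat} (h : s < pvF1 pre n i) :
    ¬(i + 1 ≤ s ∧ (n ≤ s ∨ 2 * pre.getD (i + 1) 0 ≤ pre.getD (s + 1) 0)) :=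
  Nat.find_min (pvF1ex pre n i) h

theorem pvF1_min' (pre : List Int) (n i : Nat) {j : Nat}
    (h : i + 1 ≤ j ∧ (n ≤ j ∨ 2 * pre.getD (i + 1) 0 ≤ pre.getD (j + 1) 0)) :
    pvF1 pre n i ≤ j :=
  Nat.find_min' (pvF1ex pre n i) h

theorem pvF2_spec (pre : List Int) (n i : Nat) :
    pvF1 pre n i ≤ pvF2 pre n i ∧
      (n ≤ pvF2 pre n i + 1 ∨ pre.getD n 0 + pre.getD (i + 1) 0 < 2 * pre.getD (pvF2 pre n i + 1) 0) :=
  Nat.find_spec (pvF2ex pre n i)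

theorem pvF2_min (pre : List Int) (n i : Nat) {s : Nat} (h : s < pvF2 pre n i) :
    ¬(pvF1 pre n i ≤ s ∧ (n ≤ s + 1 ∨ pre.getD n 0 + pre.getD (i + 1) 0 < 2 * pre.getD (s + 1) 0)) :=
  Nat.find_min (pvF2ex pre n i) h

theorem pvF2_min' (pre : List Int) (n i : Nat) {j : Nat}
    (h : pvF1 pre n i ≤ j ∧ (n ≤ j + 1 ∨ pre.getD n 0 + pre.getD (i + 1) 0 < 2 * pre.getD (j + 1) 0)) :
    pvF2 pre n i ≤ j :=
  Nat.find_min' (pvF2ex pre n i) h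

-- one-step unfolding of each while loop (the fuel is exactly the loop's decreasing measure)
theorem pvAdv1_unfold (pre : List Int) (n i j : Nat) :
    pvAdv1 pre n i j
      = if j ≤ i ∨ (j < n ∧ pre.getD (j + 1) 0 - pre.getD (i + 1) 0 < pre.getD (i + 1) 0) then
          pvAdv1 pre n i (j + 1)
        else j := by
  unfold pvAdv1
  rcases h : n + i + 1 - j with _ | fuel
  · simp only [pvAdv1Aux]
    rw [if_neg]
    push_neg
    exact ⟨by omega, fun h' => absurd h' (by omega)⟩
  · simp only [pvAdv1Aux]
    have e : n + i + 1 - (j + 1) = fuel := by omega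
    rw [e]

theorem pvAdv2_unfold (pre : List Int) (n i j1 j : Nat) :
    pvAdv2 pre n i j1 j
      = if j < j1 ∨ (j + 1 < n ∧ pre.getD n 0 - pre.getD (j + 1) 0 ≥ pre.getD (j + 1) 0 - pre.getD (i + 1) 0) then
          pvAdv2 pre n i j1 (j + 1)
        else j := by
  unfold pvAdv2
  rcases h : max j1 n - j with _ | fuel
  · simp only [pvAdv2Aux]
    rw [if_neg]
    push_neg
    exact ⟨by omega, fun h' => absurd h' (by omega)⟩
  · simp only [pvAdv2Aux]
    have e : max j1 n - (j + 1) = fuel := by omega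
    rw [e]

-- A's first while, started at or below its stopping point, stops exactly at pvF1.
theorem pvAdv1_eq_F1 (pre : List Int) (n i : Nat) :
    ∀ s, s ≤ pvF1 pre n i → pvAdv1 pre n i s = pvF1 pre n i := by
  have stop : pvAdv1 pre n i (pvF1 pre n i) = pvF1 pre n i := by
    have hspec := pvF1_spec pre n i
    rw [pvAdv1_unfold, if_neg]
    rintro (h | ⟨h1, h2⟩)
    · omega
    · rcases hspec.2 with h3 | h3 <;> omega
  have key : ∀ d s, pvF1 pre n i - s ≤ d → s ≤ pvF1 pre n i → pvAdv1 pre n i s = pvF1 pre n i := by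
    intro d
    induction d with
    | zero =>
      intro s hd hs
      have : s = pvF1 pre n i := by omega
      rw [this, stop]
    | succ d ih =>
      intro s hd hs
      by_cases he : s = pvF1 pre n i
      · rw [he, stop]
      · have hlt : s < pvF1 pre n i := by omega
        have hnotP := pvF1_min pre n i hlt
        rw [pvAdv1_unfold, if_pos, ih (s + 1) (by omega) (by omega)]
        by_cases hsi : s ≤ i
        · exact Or.inl hsi
        · have hq : ¬(n ≤ s ∨ 2 * pre.getD (i + 1) 0 ≤ pre.getD (s + 1) 0) :=
            fun hq => hnotP ⟨by omega, hq⟩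
          rcases not_or.mp hq with ⟨h1n, h2n⟩
          exact Or.inr ⟨by omega, by omega⟩
  intro s hs
  exact key (pvF1 pre n i - s) s le_rfl hs

-- A's second while, started at or below its stopping point (with j1 = pvF1), stops at pvF2.
theorem pvAdv2_eq_F2 (pre : List Int) (n i : Nat) :
    ∀ s, s ≤ pvF2 pre n i → pvAdv2 pre n i (pvF1 pre n i) s = pvF2 pre n i := by
  have stop : pvAdv2 pre n i (pvF1 pre n i) (pvF2 pre n i) = pvF2 pre n i := by
    have hspec := pvF2_spec pre n i
    rw [pvAdv2_unfold, if_neg]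
    rintro (h | ⟨h1, h2⟩)
    · omega
    · rcases hspec.2 with h3 | h3 <;> omega
  have key : ∀ d s, pvF2 pre n i - s ≤ d → s ≤ pvF2 pre n i →
      pvAdv2 pre n i (pvF1 pre n i) s = pvF2 pre n i := by
    intro d
    induction d with
    | zero =>
      intro s hd hs
      have : s = pvF2 pre n i := by omega
      rw [this, stop]
    | succ d ih =>
      intro s hd hs
      by_cases he : s = pvF2 pre n i
      · rw [he, stop]
      · have hlt : s < pvF2 pre n i := by omega
        have hnotP := pvF2_min pre n i hlt
        rw [pvAdv2_unfold, if_pos, ih (s + 1) (by omega) (by omega)]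
        by_cases hsj : s < pvF1 pre n i
        · exact Or.inl hsj
        · have hq : ¬(n ≤ s + 1 ∨ pre.getD n 0 + pre.getD (i + 1) 0 < 2 * pre.getD (s + 1) 0) :=
            fun hq => hnotP ⟨by omega, hq⟩
          rcases not_or.mp hq with ⟨h1n, h2n⟩
          exact Or.inr ⟨by omega, by omega⟩
  intro s hs
  exact key (pvF2 pre n i - s) s le_rfl hs

-- monotonicity of the stopping points in i (needs the prefix array monotone)
theorem pvF1_mono (pre : List Int) (n : Nat)
    (hs : ∀ k, k < n → pre.getD k 0 ≤ pre.getD (k + 1) 0) (i j : Nat)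
    (hij : i + 1 = j) (hjn : j < n) :
    pvF1 pre n i ≤ pvF1 pre n j := by
  subst hij
  apply pvF1_min'
  have hspec := pvF1_spec pre n (i + 1)
  refine ⟨by omega, ?_⟩
  rcases hspec.2 with h | h
  · exact Or.inl h
  · have := hs (i + 1) hjn
    exact Or.inr (by omega)

theorem pvF2_mono (pre : List Int) (n : Nat)
    (hs : ∀ k, k < n → pre.getD k 0 ≤ pre.getD (k + 1) 0) (i j : Nat)
    (hij : i + 1 = j) (hjn : j < n) :
    pvF2 pre n i ≤ pvF2 pre n j := by
  subst hij
  apply pvF2_min'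
  have hspec := pvF2_spec pre n (i + 1)
  refine ⟨le_trans (pvF1_mono pre n hs i (i + 1) rfl hjn) hspec.1, ?_⟩
  rcases hspec.2 with h | h
  · exact Or.inl h
  · have := hs (i + 1) hjn
    exact Or.inr (by omega)

-- correctness of the binary searches on a sorted array
theorem pvBisectLeftAux_correct (a : List Int) (x : Int) (n : Nat)
    (hs2 : ∀ k l, k ≤ l → l ≤ n → a.getD k 0 ≤ a.getD l 0) :
    ∀ fuel lo hi, hi - lo ≤ fuel → lo ≤ hi → hi ≤ n + 1 →
      lo ≤ pvBisectLeftAux a x fuel lo hi ∧ pvBisectLeftAux a x fuel lo hi ≤ hi ∧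
      (∀ k, lo ≤ k → k < pvBisectLeftAux a x fuel lo hi → a.getD k 0 < x) ∧
      (∀ k, pvBisectLeftAux a x fuel lo hi ≤ k → k < hi → x ≤ a.getD k 0) := by
  intro fuel
  induction fuel with
  | zero =>
    intro lo hi h1 h2 h3
    simp only [pvBisectLeftAux]
    exact ⟨le_rfl, h2, fun k hk1 hk2 => absurd hk2 (by omega),
           fun k hk1 hk2 => absurd hk2 (by omega)⟩
  | succ fuel ih =>
    intro lo hi h1 h2 h3
    by_cases hlh : lo < hi
    · simp only [pvBisectLeftAux, if_pos hlh]
      by_cases hc : a.getD ((lo + hi) / 2) 0 < x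
      · rw [if_pos hc]
        obtain ⟨r1, r2, r3, r4⟩ := ih ((lo + hi) / 2 + 1) hi (by omega) (by omega) h3
        refine ⟨by omega, r2, ?_, r4⟩
        intro k hk1 hk2
        by_cases hkm : k ≤ (lo + hi) / 2
        · exact lt_of_le_of_lt (hs2 k ((lo + hi) / 2) hkm (by omega)) hc
        · exact r3 k (by omega) hk2
      · rw [if_neg hc]
        obtain ⟨r1, r2, r3, r4⟩ := ih lo ((lo + hi) / 2) (by omega) (by omega) (by omega)
        refine ⟨r1, by omega, r3, ?_⟩
        intro k hk1 hk2
        by_cases hkm : k < (lo + hi) / 2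
        · exact r4 k hk1 hkm
        · exact le_trans (not_lt.mp hc) (hs2 ((lo + hi) / 2) k (by omega) (by omega))
    · simp only [pvBisectLeftAux, if_neg hlh]
      exact ⟨le_rfl, by omega, fun k hk1 hk2 => absurd hk2 (by omega),
             fun k hk1 hk2 => absurd hk2 (by omega)⟩

theorem pvBisectRightAux_correct (a : List Int) (x : Int) (n : Nat)
    (hs2 : ∀ k l, k ≤ l → l ≤ n → a.getD k 0 ≤ a.getD l 0) :
    ∀ fuel lo hi, hi - lo ≤ fuel → lo ≤ hi → hi ≤ n + 1 →
      lo ≤ pvBisectRightAux a x fuel lo hi ∧ pvBisectRightAux a x fuel lo hi ≤ hi ∧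
      (∀ k, lo ≤ k → k < pvBisectRightAux a x fuel lo hi → a.getD k 0 ≤ x) ∧
      (∀ k, pvBisectRightAux a x fuel lo hi ≤ k → k < hi → x < a.getD k 0) := by
  intro fuel
  induction fuel with
  | zero =>
    intro lo hi h1 h2 h3
    simp only [pvBisectRightAux]
    exact ⟨le_rfl, h2, fun k hk1 hk2 => absurd hk2 (by omega),
           fun k hk1 hk2 => absurd hk2 (by omega)⟩
  | succ fuel ih =>
    intro lo hi h1 h2 h3
    by_cases hlh : lo < hi
    · simp only [pvBisectRightAux, if_pos hlh]
      by_cases hc : x < a.getD ((lo + hi) / 2) 0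
      · rw [if_pos hc]
        obtain ⟨r1, r2, r3, r4⟩ := ih lo ((lo + hi) / 2) (by omega) (by omega) (by omega)
        refine ⟨r1, by omega, r3, ?_⟩
        intro k hk1 hk2
        by_cases hkm : k < (lo + hi) / 2
        · exact r4 k hk1 hkm
        · exact lt_of_lt_of_le hc (hs2 ((lo + hi) / 2) k (by omega) (by omega))
      · rw [if_neg hc]
        obtain ⟨r1, r2, r3, r4⟩ := ih ((lo + hi) / 2 + 1) hi (by omega) (by omega) h3
        refine ⟨by omega, r2, ?_, r4⟩
        intro k hk1 hk2
        by_cases hkm : k ≤ (lo + hi) / 2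
        · exact le_trans (hs2 k ((lo + hi) / 2) hkm (by omega)) (not_lt.mp hc)
        · exact r3 k (by omega) hk2
    · simp only [pvBisectRightAux, if_neg hlh]
      exact ⟨le_rfl, by omega, fun k hk1 hk2 => absurd hk2 (by omega),
             fun k hk1 hk2 => absurd hk2 (by omega)⟩

-- B's bisect_left computes pvF1
theorem pvLo_eq_F1 (pre : List Int) (n i : Nat)
    (hs2 : ∀ k l, k ≤ l → l ≤ n → pre.getD k 0 ≤ pre.getD l 0) (hin : i < n) :
    i + 2 ≤ pvBisectLeft pre (2 * pre.getD (i + 1) 0) (i + 2) (n + 1) ∧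
    pvBisectLeft pre (2 * pre.getD (i + 1) 0) (i + 2) (n + 1) - 1 = pvF1 pre n i := by
  obtain ⟨r1, r2, r3, r4⟩ :=
    pvBisectLeftAux_correct pre (2 * pre.getD (i + 1) 0) n hs2 (n + 1 - (i + 2)) (i + 2) (n + 1)
      le_rfl (by omega) le_rfl
  set L := pvBisectLeftAux pre (2 * pre.getD (i + 1) 0) (n + 1 - (i + 2)) (i + 2) (n + 1) with hL
  have hLdef : pvBisectLeft pre (2 * pre.getD (i + 1) 0) (i + 2) (n + 1) = L := rfl
  refine ⟨hLdef ▸ r1, ?_⟩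
  rw [hLdef]
  apply le_antisymm
  · -- L - 1 ≤ pvF1: no index in [i+2, L) satisfies the threshold
    have hspec := pvF1_spec pre n i
    by_contra hcon
    push_neg at hcon
    have hjL : pvF1 pre n i + 1 < L := by omega
    have := r3 (pvF1 pre n i + 1) (by omega) hjL
    rcases hspec.2 with h | h
    · omega
    · omega
  · -- pvF1 ≤ L - 1: L - 1 satisfies the predicate
    apply pvF1_min'
    refine ⟨by omega, ?_⟩
    by_cases hLn : L = n + 1
    · exact Or.inl (by omega)
    · have hlt : L < n + 1 := by omega
      have h4 := r4 L le_rfl hlt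
      have hL1 : L - 1 + 1 = L := by omega
      rw [hL1]
      exact Or.inr h4

-- B's bisect_right yields the threshold characterising A's second stopping predicate
theorem pvU_char (pre : List Int) (n i : Nat)
    (hs2 : ∀ k l, k ≤ l → l ≤ n → pre.getD k 0 ≤ pre.getD l 0)
    (h0 : pre.getD 0 0 = 0) (ht : 0 ≤ pre.getD n 0 + pre.getD (i + 1) 0) :
    1 ≤ pvBisectRight pre (PySem.Int.floordiv (pre.getD n 0 + pre.getD (i + 1) 0) 2) 0 (n + 1) ∧
    ∀ j, (n ≤ j + 1 ∨ pre.getD n 0 + pre.getD (i + 1) 0 < 2 * pre.getD (j + 1) 0) ↔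
      min (n - 1) (pvBisectRight pre (PySem.Int.floordiv (pre.getD n 0 + pre.getD (i + 1) 0) 2) 0 (n + 1) - 1) ≤ j := by
  set t := pre.getD n 0 + pre.getD (i + 1) 0 with htdef
  set x := PySem.Int.floordiv t 2 with hxdef
  have hx : x = t / 2 := PySem.Int.floordiv_eq_ediv_of_pos (by omega)
  obtain ⟨r1, r2, r3, r4⟩ :=
    pvBisectRightAux_correct pre x n hs2 (n + 1 - 0) 0 (n + 1) le_rfl (by omega) le_rfl
  set R := pvBisectRightAux pre x (n + 1 - 0) 0 (n + 1) with hR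
  have hRdef : pvBisectRight pre x 0 (n + 1) = R := rfl
  have hR1 : 1 ≤ R := by
    by_contra hcon
    have hR0 : R = 0 := by omega
    have := r4 0 (by omega) (by omega)
    rw [h0] at this
    have hx0 : 0 ≤ x := by rw [hx]; omega
    omega
  rw [hRdef]
  refine ⟨hR1, fun j => ⟨fun h => ?_, fun h => ?_⟩⟩
  · rcases h with h | h
    · omega
    · -- t < 2*pre[j+1] → pre[j+1] > x → R ≤ j+1 → R-1 ≤ j
      have hxlt : x < pre.getD (j + 1) 0 := by rw [hx]; omega
      have hRle : R ≤ j + 1 := by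
        by_contra hcon
        have := r3 (j + 1) (by omega) (by omega)
        omega
      omega
  · by_cases hjn : n ≤ j + 1
    · exact Or.inl hjn
    · have hjlt : j + 1 < n := by omega
      have hmin : R - 1 ≤ j := by omega
      have := r4 (j + 1) (by omega) (by omega)
      refine Or.inr ?_
      rw [hx] at this
      omega

-- closed form for pvF2 in terms of pvF1 and the bisect_right threshold
theorem pvF2_closed (pre : List Int) (n i : Nat)
    (hs2 : ∀ k l, k ≤ l → l ≤ n → pre.getD k 0 ≤ pre.getD l 0)
    (h0 : pre.getD 0 0 = 0) (ht : 0 ≤ pre.getD n 0 + pre.getD (i + 1) 0) :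
    pvF2 pre n i =
      max (pvF1 pre n i)
        (min (n - 1) (pvBisectRight pre (PySem.Int.floordiv (pre.getD n 0 + pre.getD (i + 1) 0) 2) 0 (n + 1) - 1)) := by
  obtain ⟨hR1, hc⟩ := pvU_char pre n i hs2 h0 ht
  set m := min (n - 1) (pvBisectRight pre (PySem.Int.floordiv (pre.getD n 0 + pre.getD (i + 1) 0) 2) 0 (n + 1) - 1)
  apply le_antisymm
  · apply pvF2_min'
    exact ⟨by omega, (hc _).mpr (by omega)⟩
  · have hspec := pvF2_spec pre n i
    have := (hc (pvF2 pre n i)).mp hspec.2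
    omega

-- monotonicity of the prefix array under nonnegative inputs
theorem pvScanl_getD_zero (init : Int) (xs : List Int) :
    (List.scanl (· + ·) init xs).getD 0 0 = init := by
  cases xs <;> simp [List.scanl]

theorem pvScanl_adj (xs : List Int) : ∀ (init : Int), (∀ x ∈ xs, 0 ≤ x) →
    ∀ k, k < xs.length →
      (List.scanl (· + ·) init xs).getD k 0 ≤ (List.scanl (· + ·) init xs).getD (k + 1) 0 := by
  induction xs with
  | nil => intro init h k hk; simp at hk
  | cons a l ih =>
    intro init h k hk
    rw [List.scanl_cons]
    cases k with
    | zero =>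
      have ha : 0 ≤ a := h a List.mem_cons_self
      have h1 : (init :: List.scanl (· + ·) (init + a) l).getD 0 0 = init := rfl
      have h2 : (init :: List.scanl (· + ·) (init + a) l).getD (0 + 1) 0
          = (List.scanl (· + ·) (init + a) l).getD 0 0 := rfl
      rw [h1, h2, pvScanl_getD_zero]
      omega
    | succ k =>
      have h1 : (init :: List.scanl (· + ·) (init + a) l).getD (k + 1) 0
          = (List.scanl (· + ·) (init + a) l).getD k 0 := rfl
      have h2 : (init :: List.scanl (· + ·) (init + a) l).getD (k + 1 + 1) 0
          = (List.scanl (· + ·) (init + a) l).getD (k + 1) 0 := rfl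
      rw [h1, h2]
      exact ih (init + a) (fun x hx => h x (List.mem_cons_of_mem _ hx)) k (by simpa using hk)

theorem pvMonoChain (pre : List Int) (n : Nat)
    (hs : ∀ k, k < n → pre.getD k 0 ≤ pre.getD (k + 1) 0) :
    ∀ k l, k ≤ l → l ≤ n → pre.getD k 0 ≤ pre.getD l 0 := by
  intro k l hkl
  induction l, hkl using Nat.le_induction with
  | base => intro _; exact le_rfl
  | succ l hkl ih => intro hl; exact le_trans (ih (by omega)) (hs l (by omega))

-- proof-only name for A's loop body (definitionally the lambda inside lc_1712)
def pvStepA (pre : List Int) (n : Nat) (st : Nat × Nat × Int) (i : Nat) : Nat × Nat × Int :=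
  let j1 := pvAdv1 pre n i st.1
  let j2 := pvAdv2 pre n i j1 st.2.1
  (j1, j2, if j1 ≤ j2 then st.2.2 + ((j2 : Int) - (j1 : Int)) else st.2.2)

-- A's fold threads exactly the stopping points pvF1/pvF2 and sums their differences
theorem pvFoldA (pre : List Int) (n : Nat)
    (hs : ∀ k, k < n → pre.getD k 0 ≤ pre.getD (k + 1) 0) :
    ∀ m, m ≤ n → (List.range m).foldl (pvStepA pre n) (0, 0, 0)
      = ((if m = 0 then 0 else pvF1 pre n (m - 1)),
         (if m = 0 then 0 else pvF2 pre n (m - 1)),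
         (List.range m).foldl (fun a i => a + ((pvF2 pre n i : Int) - (pvF1 pre n i : Int))) 0) := by
  intro m
  induction m with
  | zero => intro _; simp
  | succ m ih =>
    intro hm
    rw [List.range_succ, List.foldl_append, List.foldl_append, ih (by omega)]
    have hA1 : (if m = 0 then 0 else pvF1 pre n (m - 1)) ≤ pvF1 pre n m := by
      rcases Nat.eq_zero_or_pos m with h | h
      · simp [h]
      · rw [if_neg (by omega)]
        exact pvF1_mono pre n hs (m - 1) m (by omega) (by omega)
    have hA2 : (if m = 0 then 0 else pvF2 pre n (m - 1)) ≤ pvF2 pre n m := by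
      rcases Nat.eq_zero_or_pos m with h | h
      · simp [h]
      · rw [if_neg (by omega)]
        exact pvF2_mono pre n hs (m - 1) m (by omega) (by omega)
    have hguard : pvF1 pre n m ≤ pvF2 pre n m := (pvF2_spec pre n m).1
    simp only [List.foldl_cons, List.foldl_nil, pvStepA,
      pvAdv1_eq_F1 pre n m _ hA1, pvAdv2_eq_F2 pre n m _ hA2, if_pos hguard, if_neg (by omega : ¬ m + 1 = 0)]
    simp

theorem lc_1712_spec_aux (nums : List Int) (hpre : ∀ x ∈ nums, 0 ≤ x) :
    lc_1712 nums = lc_1712_alt nums := by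
  set n := nums.length with hn
  set pre := pvPre nums with hpredef
  have hs : ∀ k, k < n → pre.getD k 0 ≤ pre.getD (k + 1) 0 := fun k hk =>
    pvScanl_adj nums 0 hpre k hk
  have hs2 : ∀ k l, k ≤ l → l ≤ n → pre.getD k 0 ≤ pre.getD l 0 := pvMonoChain pre n hs
  have h0 : pre.getD 0 0 = 0 := pvScanl_getD_zero 0 nums
  have eA : lc_1712 nums
      = PySem.Int.mod (((List.range n).foldl (pvStepA pre n) (0, 0, 0)).2.2) (10 ^ 9 + 7) := rfl
  rw [eA, pvFoldA pre n hs n le_rfl]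
  have eB : lc_1712_alt nums
      = PySem.Int.mod ((List.range n).foldl
          (fun (ans : Int) i =>
            ans + (max ((pvBisectLeft pre (2 * pre.getD (i + 1) 0) (i + 2) (n + 1) : Int) - 1)
                    (min ((n : Int) - 1)
                      ((pvBisectRight pre (PySem.Int.floordiv (pre.getD n 0 + pre.getD (i + 1) 0) 2) 0 (n + 1) : Int) - 1))
                  - ((pvBisectLeft pre (2 * pre.getD (i + 1) 0) (i + 2) (n + 1) : Int) - 1))) 0)
          (10 ^ 9 + 7) := rfl
  rw [eB]
  congr 1
  apply PySem.List.foldl_congr_mem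
  intro acc i hi
  have hin : i < n := List.mem_range.mp hi
  have ht : 0 ≤ pre.getD n 0 + pre.getD (i + 1) 0 := by
    have h1 : pre.getD 0 0 ≤ pre.getD n 0 := hs2 0 n (by omega) le_rfl
    have h2 : pre.getD 0 0 ≤ pre.getD (i + 1) 0 := hs2 0 (i + 1) (by omega) (by omega)
    omega
  obtain ⟨hL2, hLF1⟩ := pvLo_eq_F1 pre n i hs2 hin
  obtain ⟨hR1, _⟩ := pvU_char pre n i hs2 h0 ht
  have hF2 := pvF2_closed pre n i hs2 h0 ht
  set L := pvBisectLeft pre (2 * pre.getD (i + 1) 0) (i + 2) (n + 1) with hLdef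
  set R := pvBisectRight pre (PySem.Int.floordiv (pre.getD n 0 + pre.getD (i + 1) 0) 2) 0 (n + 1) with hRdef
  congr 1
  have c1 : (L : Int) - 1 = ((pvF1 pre n i : Nat) : Int) := by omega
  have c2 : (R : Int) - 1 = (((R - 1 : Nat) : Nat) : Int) := by omega
  have c3 : (n : Int) - 1 = (((n - 1 : Nat) : Nat) : Int) := by omega
  rw [c1, c2, c3, ← Nat.cast_min, ← Nat.cast_max, ← hF2]

-- both programs return 0 on lists of length ≤ 2 (no three nonempty parts exist)
theorem pvContribZero (lo v u : Int) (h : v ≤ lo) : max lo (min v u) - lo = 0 := by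
  rw [max_eq_left (le_trans (min_le_left _ _) h)]
  ring

theorem pvSmall0 : lc_1712 [] = lc_1712_alt [] := rfl

theorem pvSmall1 (a : Int) : lc_1712 [a] = lc_1712_alt [a] := by
  have eA : lc_1712 [a] = PySem.Int.mod 0 (10 ^ 9 + 7) := rfl
  have eB : lc_1712_alt [a]
      = PySem.Int.mod
          (0 + (max ((pvBisectLeft (pvPre [a]) (2 * (pvPre [a]).getD 1 0) 2 2 : Int) - 1)
                 (min (((1 : Nat) : Int) - 1)
                   ((pvBisectRight (pvPre [a])
                      (PySem.Int.floordiv ((pvPre [a]).getD 1 0 + (pvPre [a]).getD 1 0) 2) 0 2 : Int) - 1))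
               - ((pvBisectLeft (pvPre [a]) (2 * (pvPre [a]).getD 1 0) 2 2 : Int) - 1)))
          (10 ^ 9 + 7) := rfl
  rw [eA, eB]
  have hL : pvBisectLeft (pvPre [a]) (2 * (pvPre [a]).getD 1 0) 2 2 = 2 := rfl
  rw [hL, pvContribZero _ _ _ (by norm_num)]
  norm_num

theorem pvSmall2 (a b : Int) : lc_1712 [a, b] = lc_1712_alt [a, b] := by
  set pre := pvPre [a, b] with hpre
  -- A's loops: stopping positions at n = 2 do not depend on which branch the comparison takes
  have h10 : pvAdv1 pre 2 0 0 = 1 ∨ pvAdv1 pre 2 0 0 = 2 := by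
    rw [pvAdv1_unfold, if_pos (Or.inl (by omega))]
    by_cases hc : pre.getD 2 0 - pre.getD 1 0 < pre.getD 1 0
    · right
      rw [pvAdv1_unfold, if_pos (Or.inr ⟨by omega, hc⟩), pvAdv1_unfold, if_neg]
      rintro (h | ⟨h, _⟩) <;> omega
    · left
      rw [pvAdv1_unfold, if_neg]
      rintro (h | ⟨h, hcc⟩)
      · omega
      · exact hc hcc
  have h20 : ∀ j1, j1 = 1 ∨ j1 = 2 → pvAdv2 pre 2 0 j1 0 = j1 := by
    rintro j1 (rfl | rfl)
    · rw [pvAdv2_unfold, if_pos (Or.inl (by omega)), pvAdv2_unfold, if_neg]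
      rintro (h | ⟨h, _⟩) <;> omega
    · rw [pvAdv2_unfold, if_pos (Or.inl (by omega)), pvAdv2_unfold,
        if_pos (Or.inl (by omega)), pvAdv2_unfold, if_neg]
      rintro (h | ⟨h, _⟩) <;> omega
  have h11 : ∀ s, s = 1 ∨ s = 2 → pvAdv1 pre 2 1 s = 2 := by
    rintro s (rfl | rfl)
    · rw [pvAdv1_unfold, if_pos (Or.inl (by omega)), pvAdv1_unfold, if_neg]
      rintro (h | ⟨h, _⟩) <;> omega
    · rw [pvAdv1_unfold, if_neg]
      rintro (h | ⟨h, _⟩) <;> omega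
  have h21 : ∀ s, s = 1 ∨ s = 2 → pvAdv2 pre 2 1 2 s = 2 := by
    rintro s (rfl | rfl)
    · rw [pvAdv2_unfold, if_pos (Or.inl (by omega)), pvAdv2_unfold, if_neg]
      rintro (h | ⟨h, _⟩) <;> omega
    · rw [pvAdv2_unfold, if_neg]
      rintro (h | ⟨h, _⟩) <;> omega
  have eA : lc_1712 [a, b]
      = PySem.Int.mod ((pvStepA pre 2 (pvStepA pre 2 (0, 0, 0) 0) 1).2.2) (10 ^ 9 + 7) := rfl
  have hs1 : pvStepA pre 2 (0, 0, 0) 0 = (pvAdv1 pre 2 0 0, pvAdv1 pre 2 0 0, 0) := by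
    rcases h10 with h1 | h1 <;>
      simp only [pvStepA, h1, h20 1 (Or.inl rfl), h20 2 (Or.inr rfl)] <;> norm_num
  have hAval : (pvStepA pre 2 (pvStepA pre 2 (0, 0, 0) 0) 1).2.2 = 0 := by
    rw [hs1]
    rcases h10 with h1 | h1 <;>
      simp only [pvStepA, h1, h11 1 (Or.inl rfl), h11 2 (Or.inr rfl),
        h21 1 (Or.inl rfl), h21 2 (Or.inr rfl)] <;> norm_num
  have eB : lc_1712_alt [a, b]
      = PySem.Int.mod
          ((0 + (max ((pvBisectLeft pre (2 * pre.getD 1 0) 2 3 : Int) - 1)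
                 (min (((2 : Nat) : Int) - 1)
                   ((pvBisectRight pre
                      (PySem.Int.floordiv (pre.getD 2 0 + pre.getD 1 0) 2) 0 3 : Int) - 1))
               - ((pvBisectLeft pre (2 * pre.getD 1 0) 2 3 : Int) - 1)))
            + (max ((pvBisectLeft pre (2 * pre.getD 2 0) 3 3 : Int) - 1)
                (min (((2 : Nat) : Int) - 1)
                  ((pvBisectRight pre
                     (PySem.Int.floordiv (pre.getD 2 0 + pre.getD 2 0) 2) 0 3 : Int) - 1))
              - ((pvBisectLeft pre (2 * pre.getD 2 0) 3 3 : Int) - 1)))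
          (10 ^ 9 + 7) := rfl
  have hL0 : pvBisectLeft pre (2 * pre.getD 1 0) 2 3 = 2 ∨
      pvBisectLeft pre (2 * pre.getD 1 0) 2 3 = 3 := by
    unfold pvBisectLeft
    simp only [pvBisectLeftAux]
    by_cases hc : pre.getD ((2 + 3) / 2) 0 < 2 * pre.getD 1 0
    · rw [if_pos (by omega), if_pos hc]
      right; rfl
    · rw [if_pos (by omega), if_neg hc]
      left; rfl
  have hL1 : pvBisectLeft pre (2 * pre.getD 2 0) 3 3 = 3 := rfl
  rw [eA, hAval, eB, hL1]
  rcases hL0 with hL | hL <;>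
    rw [hL, pvContribZero _ _ _ (by norm_num), pvContribZero _ _ _ (by norm_num)] <;> norm_num

-- ===== VERDICT (by name: the statement is the Claim_ definition above) =====
theorem lc_1712_spec : Claim_equal_lc_1712 := by
  intro nums _ hpre
  unfold Spec_lc_1712
  rcases hpre with hpre | hlen
  · exact lc_1712_spec_aux nums hpre
  · match nums, hlen with
    | [], _ => exact pvSmall0
    | [a], _ => exact pvSmall1 a
    | [a, b], _ => exact pvSmall2 a b
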